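-- pv_equiv track=rewrite | github.com/UWPCE-PythonCert-ClassRepos/Self_Paced-Online | students/carlos_novoa/lesson01/puzzles.py | lucky_sum
-- ===== SOURCE A (Python) =====
-- def lucky_sum(a, b, c):
--     ll = [a, b, c]
--     l_s = 0
--     for i in range(len(ll)):
--         if (ll[i] == 13):
--             break
--         l_s = l_s+ll[i]
--     return l_s
-- ===== SOURCE B (Python) =====
-- def lucky_sum(a, b, c):
--     # Right-to-left fold: each 13 resets the running suffix sum to 0,
--     # so the final value is the sum of the elements before the FIRST 13.
--     s = 0
--     for x in (c, b, a):
--         s = 0 if x == 13 else x + s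
--     return s
-- ===== Notes on version B (the rewrite author's own statement) =====
-- stated objective: alternative
-- what changed: Replaces the left-to-right accumulate-and-break scan with a right-to-left fold that resets the accumulator to 0 at every 13 (the last reset wins), so no search or early exit is needed.
import Mathlib
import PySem

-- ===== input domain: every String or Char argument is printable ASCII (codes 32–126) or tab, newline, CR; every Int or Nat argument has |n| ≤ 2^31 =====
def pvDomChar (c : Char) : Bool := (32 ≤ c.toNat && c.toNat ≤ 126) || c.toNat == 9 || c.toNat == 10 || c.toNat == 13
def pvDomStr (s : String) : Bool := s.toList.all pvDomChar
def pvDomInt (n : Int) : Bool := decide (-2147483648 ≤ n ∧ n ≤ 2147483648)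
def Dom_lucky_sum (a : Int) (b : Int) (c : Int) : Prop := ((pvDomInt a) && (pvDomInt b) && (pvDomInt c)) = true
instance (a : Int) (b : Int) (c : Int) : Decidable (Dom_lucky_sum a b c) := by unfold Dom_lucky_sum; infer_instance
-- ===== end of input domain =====

-- B replaces A's left-to-right accumulate-and-break loop by a right-to-left fold
-- that resets the accumulator at every 13; objective: alternative.

-- ===== PORT A =====
-- A's for-loop with break: scan elements left to right, stop at 13, otherwise accumulate.
def luckyLoopA : List Int → Int → Int
  | [], l_s => l_s
  | x :: xs, l_s => if x == 13 then l_s else luckyLoopA xs (l_s + x)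

def lucky_sum (a : Int) (b : Int) (c : Int) : Int :=
  luckyLoopA [a, b, c] 0

-- ===== PORT B =====
-- B's loop: fold over (c, b, a); a 13 resets the running suffix sum to 0.
def lucky_sum_alt (a : Int) (b : Int) (c : Int) : Int :=
  [c, b, a].foldl (fun s x => if x == 13 then 0 else x + s) 0

-- ===== PRECONDITION & SPEC =====
def Spec_lucky_sum (a : Int) (b : Int) (c : Int) (out : Int) : Prop := out = lucky_sum_alt a b c
instance (a : Int) (b : Int) (c : Int) (out : Int) : Decidable (Spec_lucky_sum a b c out) := by unfold Spec_lucky_sum; infer_instance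

-- ===== CLAIM =====
def Claim_equal_lucky_sum : Prop := ∀ (a : Int) (b : Int) (c : Int), Dom_lucky_sum a b c → Spec_lucky_sum a b c (lucky_sum a b c)

-- ===== LEMMAS AND PROOFS =====

-- ===== VERDICT =====
theorem lucky_sum_spec : Claim_equal_lucky_sum := by
  intro a b c _
  unfold Spec_lucky_sum lucky_sum lucky_sum_alt
  by_cases ha : a = 13 <;> by_cases hb : b = 13 <;> by_cases hc : c = 13 <;>
    simp [ha, hb, hc, luckyLoopA, List.foldl] <;> ring
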